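-- pv_equiv track=rewrite | github.com/Nic30/hwtBuildsystem | hwtBuildsystem/vivado/logParser/synthesis.py | _parseTableSize
-- ===== SOURCE A (Python) =====
-- def _parseTableSize(headerLine):
--     offset = 1  # 0 is table boundary
--     columns = []
--     for column in headerLine.split("+")[1:-1]:
--         c_width = len(column)
--         columns.append((offset, offset + c_width))
--         offset += c_width + 1  # +1 for table |
--
--     return columns
-- ===== SOURCE B (Python) =====
-- def _parseTableSize(headerLine):
--     # B: scan for '+' delimiter positions once, then emit one (start, end) pair
--     # per adjacent pair of delimiters, relative to the first delimiter.
--     ps = [i for i, c in enumerate(headerLine) if c == "+"]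
--     return [(p + 1 - ps[0], q - ps[0]) for p, q in zip(ps, ps[1:])]
-- ===== Notes on version B (the rewrite author's own statement) =====
-- stated objective: alternative
-- what changed: B replaces split('+') plus a running-offset accumulation loop with a single scan for '+' positions followed by a map over adjacent position pairs (shifted to the first delimiter), with no mutable offset and no split.
import Mathlib
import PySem

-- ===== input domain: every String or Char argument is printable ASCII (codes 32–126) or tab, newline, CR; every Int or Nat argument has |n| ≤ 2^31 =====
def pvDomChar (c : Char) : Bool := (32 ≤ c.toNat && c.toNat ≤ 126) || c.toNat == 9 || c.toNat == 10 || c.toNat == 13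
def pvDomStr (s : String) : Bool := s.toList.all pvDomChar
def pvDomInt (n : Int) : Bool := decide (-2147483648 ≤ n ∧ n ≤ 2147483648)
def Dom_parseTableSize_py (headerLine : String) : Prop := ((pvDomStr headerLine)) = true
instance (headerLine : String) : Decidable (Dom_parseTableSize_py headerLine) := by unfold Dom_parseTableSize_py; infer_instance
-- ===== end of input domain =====

-- B replaces split('+') + running-offset loop by a '+'-position scan and a map over
-- adjacent position pairs; same results on every input (objective: alternative).

-- ===== PORT A =====
def parseTableSize_py (headerLine : String) : List (Int × Int) :=
  -- columns = []; offset = 1; for column in headerLine.split("+")[1:-1]: ...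
  let parts := headerLine.toList.splitOn '+'
  let mids := PySem.List.slice parts (some 1) (some (-1))
  (mids.foldl
    (fun (st : Int × List (Int × Int)) (column : List Char) =>
      (st.1 + (column.length : Int) + 1,
       st.2 ++ [(st.1, st.1 + (column.length : Int))]))
    ((1 : Int), ([] : List (Int × Int)))).2

-- ===== PORT B =====
def parseTableSize_py_alt (headerLine : String) : List (Int × Int) :=
  -- ps = [i for i, c in enumerate(headerLine) if c == "+"]
  let ps : List Int := (PySem.List.enumerate headerLine.toList 0).filterMap
    (fun ic => if ic.2 = '+' then some ic.1 else none)
  -- [(p + 1 - ps[0], q - ps[0]) for p, q in zip(ps, ps[1:])]  (ps[0] only read when a pair exists)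
  match ps with
  | [] => []
  | p0 :: _ => (ps.zip ps.tail).map (fun pq => (pq.1 + 1 - p0, pq.2 - p0))

-- ===== PRECONDITION & SPEC =====
def Spec_parseTableSize_py (headerLine : String) (out : List (Int × Int)) : Prop := out = parseTableSize_py_alt headerLine
instance (headerLine : String) (out : List (Int × Int)) : Decidable (Spec_parseTableSize_py headerLine out) := by unfold Spec_parseTableSize_py; infer_instance

-- ===== CLAIM (what is proved, stated in full; the proofs are below) =====
def Claim_equal_parseTableSize_py : Prop := ∀ (headerLine : String), Dom_parseTableSize_py headerLine → Spec_parseTableSize_py headerLine (parseTableSize_py headerLine)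

-- ===== LEMMAS AND PROOFS =====

-- fold body of port A, named for the proofs (definitionally the port's lambda)
def pvStep (st : Int × List (Int × Int)) (column : List Char) : Int × List (Int × Int) :=
  (st.1 + (column.length : Int) + 1, st.2 ++ [(st.1, st.1 + (column.length : Int))])

-- '+' positions of cs, counting from s (clean recursion for B's enumerate/filterMap)
def pvPos (cs : List Char) (s : Int) : List Int :=
  match cs with
  | [] => []
  | c :: t => if c = '+' then s :: pvPos t (s + 1) else pvPos t (s + 1)

-- pairs emitted from the chain prev :: qs of '+' positions, shifted by p0
def pvChain (p0 : Int) (prev : Int) : List Int → List (Int × Int)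
  | [] => []
  | q :: qs => (prev + 1 - p0, q - p0) :: pvChain p0 q qs

theorem pvPos_eq (cs : List Char) (s : Int) :
    (PySem.List.enumerate cs s).filterMap
      (fun ic => if ic.2 = '+' then some ic.1 else none) = pvPos cs s := by
  induction cs generalizing s with
  | nil => simp [PySem.List.enumerate_nil, pvPos]
  | cons c t ih =>
    simp only [PySem.List.enumerate_cons, List.filterMap_cons, pvPos]
    by_cases h : c = '+' <;> simp [h, ih]

theorem pvPos_of_not_mem (cs : List Char) (h : '+' ∉ cs) (s : Int) : pvPos cs s = [] := by
  induction cs generalizing s with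
  | nil => rfl
  | cons c t ih =>
    simp only [List.mem_cons, not_or] at h
    simp [pvPos, Ne.symm h.1, ih h.2]

theorem pvPos_append (a t : List Char) (h : '+' ∉ a) (s : Int) :
    pvPos (a ++ '+' :: t) s = (s + a.length) :: pvPos t (s + a.length + 1) := by
  induction a generalizing s with
  | nil => simp [pvPos]
  | cons c b ih =>
    simp only [List.mem_cons, not_or] at h
    simp only [List.cons_append, pvPos, Ne.symm h.1, ih h.2]
    simp only [List.length_cons]
    push_cast
    ring_nf

theorem pv_splitOn_not_mem (cs : List Char) (h : '+' ∉ cs) : cs.splitOn '+' = [cs] := by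
  apply List.splitOnP_eq_single
  intro x hx
  simp only [beq_iff_eq]
  exact fun hc => h (hc ▸ hx)

theorem pv_splitOn_append (a t : List Char) (h : '+' ∉ a) :
    (a ++ '+' :: t).splitOn '+' = a :: t.splitOn '+' := by
  induction a with
  | nil => simp [List.splitOn, List.splitOnP_cons]
  | cons c b ih =>
    simp only [List.mem_cons, not_or] at h
    simp only [List.cons_append, List.splitOn, List.splitOnP_cons] at ih ⊢
    rw [if_neg (by simp [Ne.symm h.1]), ih h.2]
    rfl

theorem pv_slice_one_negone {α : Type} (xs : List α) :
    PySem.List.slice xs (some 1) (some (-1)) = xs.tail.dropLast := by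
  cases xs with
  | nil => rfl
  | cons x l =>
    simp [PySem.List.slice, List.dropLast_eq_take]

theorem pv_decomp (cs : List Char) :
    '+' ∉ cs ∨ ∃ a t, cs = a ++ '+' :: t ∧ '+' ∉ a := by
  induction cs with
  | nil => exact Or.inl (by simp)
  | cons c l ih =>
    by_cases hc : c = '+'
    · exact Or.inr ⟨[], l, by simp [hc], by simp⟩
    · rcases ih with h | ⟨a, t, rfl, ha⟩
      · exact Or.inl (by simp [Ne.symm hc, h])
      · exact Or.inr ⟨c :: a, t, rfl, by simp [Ne.symm hc, ha]⟩

theorem pv_chain_zip (p0 : Int) (qs : List Int) (prev : Int) :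
    ((prev :: qs).zip qs).map (fun pq => (pq.1 + 1 - p0, pq.2 - p0)) = pvChain p0 prev qs := by
  induction qs generalizing prev with
  | nil => rfl
  | cons q rest ih => simp [List.zip, pvChain, ← ih q]

theorem pv_splitOn_ne_nil (t : List Char) : t.splitOn '+' ≠ [] := by
  simpa [List.splitOn] using List.splitOnP_ne_nil (· == '+') t

theorem pv_inner (n : Nat) (r : List Char) (hn : r.length ≤ n) (prev p0 : Int)
    (acc : List (Int × Int)) :
    (((r.splitOn '+').dropLast).foldl pvStep (prev - p0 + 1, acc)).2
      = acc ++ pvChain p0 prev (pvPos r (prev + 1)) := by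
  induction n generalizing r prev acc with
  | zero =>
    have : r = [] := List.eq_nil_of_length_eq_zero (Nat.le_zero.mp hn)
    subst this
    simp [List.splitOn, pvPos, pvChain]
  | succ n ih =>
    rcases pv_decomp r with h | ⟨a, t, rfl, ha⟩
    · rw [pv_splitOn_not_mem r h, pvPos_of_not_mem r h]
      simp [pvChain]
    · rw [pv_splitOn_append a t ha, pvPos_append a t ha,
        List.dropLast_cons_of_ne_nil (pv_splitOn_ne_nil t)]
      have hlen : t.length ≤ n := by
        simp only [List.length_append, List.length_cons] at hn; omega
      simp only [List.foldl_cons, pvStep]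
      have heq : prev - p0 + 1 + (a.length : Int) + 1
          = prev + 1 + (a.length : Int) - p0 + 1 := by ring
      rw [heq, ih t hlen (prev + 1 + (a.length : Int)) _]
      simp only [pvChain, List.append_assoc, List.singleton_append]
      apply congrArg (acc ++ ·)
      congr 1
      simp only [Prod.mk.injEq]
      constructor <;> ring

theorem parseTableSize_py_spec : Claim_equal_parseTableSize_py := by
  intro s _
  unfold Spec_parseTableSize_py parseTableSize_py parseTableSize_py_alt
  simp only [pvPos_eq, pv_slice_one_negone]
  rcases pv_decomp s.toList with h | ⟨a, t, hdecomp, ha⟩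
  · rw [pv_splitOn_not_mem _ h, pvPos_of_not_mem _ h]
    rfl
  · rw [hdecomp, pv_splitOn_append a t ha, pvPos_append a t ha]
    simp only [List.tail_cons]
    have hA := pv_inner t.length t (le_refl _) (a.length : Int) (a.length : Int) []
    have h1 : ((a.length : Int) - a.length + 1) = 1 := by ring
    rw [h1] at hA
    have hbody : (fun (st : Int × List (Int × Int)) (column : List Char) =>
        (st.1 + (column.length : Int) + 1,
         st.2 ++ [(st.1, st.1 + (column.length : Int))])) = pvStep := rfl
    rw [hbody, hA]
    simp only [List.nil_append, zero_add]
    exact (pv_chain_zip (a.length : Int) (pvPos t ((a.length : Int) + 1)) (a.length : Int)).symm
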